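-- pv_equiv track=rewrite | github.com/sloproo/advent_of_code_2023 | 03/02.py | naapurit
-- ===== SOURCE A (Python) =====
-- def naapurit(luku: tuple, piirros: list) -> list:
--     palautus = []
--     pysty, alku, loppu = luku[1], luku[2], luku[3]
--
--     if pysty > 0:
--         if alku > 0:
--             palautus.append((pysty-1, alku-1))
--         palautus += [(pysty-1, x) for x in range(alku, loppu + 1)]
--         if loppu +1 < len(piirros[pysty]):
--             palautus.append((pysty-1, loppu+1))
--     if alku > 0:
--         palautus.append((pysty, alku-1))
--     if loppu + 1 < len(piirros[pysty]):
--         palautus.append((pysty, loppu+1))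
--     if pysty + 1 < len(piirros):
--         if alku > 0:
--             palautus.append((pysty+1, alku-1))
--         palautus += [(pysty+1, x) for x in range(alku, loppu + 1)]
--         if loppu +1 < len(piirros[pysty]):
--             palautus.append((pysty+1, loppu+1))
--     return palautus
-- ===== SOURCE B (Python) =====
-- def naapurit(luku: tuple, piirros: list) -> list:
--     pysty, alku, loppu = luku[1], luku[2], luku[3]
--     rows = ([pysty - 1] if pysty > 0 else []) \
--          + [pysty] \
--          + ([pysty + 1] if pysty + 1 < len(piirros) else [])
--     pairs = []
--     if alku > 0:
--         pairs += [(r, alku - 1) for r in rows]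
--     pairs += [(r, x) for x in range(alku, loppu + 1) for r in rows if r != pysty]
--     if loppu + 1 < len(piirros[pysty]):
--         pairs += [(r, loppu + 1) for r in rows]
--     return sorted(pairs)
-- ===== Notes on version B (the rewrite author's own statement) =====
-- stated objective: alternative
-- what changed: Instead of A's three hand-written row blocks emitted in a fixed order, B collects the neighbour pairs column-group-wise (left column, middle columns over the non-span rows, right column, over a precomputed in-range row list) and obtains the output ordering by sorting the collected pairs lexicographically.
-- intended difference: On degenerate empty spans with luku[3] < luku[2]-2 whose left and right neighbour columns are both emitted (luku[2] > 0 and luku[3]+1 < len(piirros[luku[1]])), A lists each row's two neighbour columns in decreasing column order (alku-1 before loppu+1 although alku-1 > loppu+1); B returns them in increasing order, the order A itself produces on every real (nonempty) number span, which is the intended one. — e.g. on naapurit([0, 0, 3, 0], ["....."]): A returns [(0, 2), (0, 1)], B returns [(0, 1), (0, 2)]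
import Mathlib
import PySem

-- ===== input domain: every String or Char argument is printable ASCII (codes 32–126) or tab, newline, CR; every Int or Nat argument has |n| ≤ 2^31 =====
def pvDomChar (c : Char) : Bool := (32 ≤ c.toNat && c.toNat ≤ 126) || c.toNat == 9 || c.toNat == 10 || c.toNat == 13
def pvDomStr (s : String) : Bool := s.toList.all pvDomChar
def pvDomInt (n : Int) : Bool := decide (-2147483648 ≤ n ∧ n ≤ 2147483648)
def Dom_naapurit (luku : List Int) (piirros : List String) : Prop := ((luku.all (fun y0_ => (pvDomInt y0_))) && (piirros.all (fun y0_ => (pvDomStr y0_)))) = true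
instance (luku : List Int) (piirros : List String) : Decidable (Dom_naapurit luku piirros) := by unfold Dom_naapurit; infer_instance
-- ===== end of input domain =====

-- B rebuilds the neighbourhood column-group-wise (left column, middle box rows, right column)
-- and then SORTS the collected pairs; A emits them row-block by row-block. Objective: alternative.
-- Intended difference (D_): on degenerate empty spans with loppu < alku - 2 and both side
-- neighbours present, A lists each row's two neighbour columns in decreasing column order;
-- B returns them in increasing order, the order A itself produces on every real span.


-- ===== PORT A =====
-- Literal transliteration of A. The pyGetD defaults are only reached outside Pre_naapurit
-- (there the Python raises IndexError).
def naapurit (luku : List Int) (piirros : List String) : List (Int × Int) :=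
  let pysty := PySem.List.pyGetD luku 1 0
  let alku  := PySem.List.pyGetD luku 2 0
  let loppu := PySem.List.pyGetD luku 3 0
  let lenRow : Int := PySem.Str.len (PySem.List.pyGetD piirros pysty "")
  let palautus : List (Int × Int) := []
  let palautus :=
    if pysty > 0 then
      let p := if alku > 0 then palautus ++ [(pysty - 1, alku - 1)] else palautus
      let p := p ++ (PySem.List.pyRange alku (loppu + 1) 1).map (fun x => (pysty - 1, x))
      if loppu + 1 < lenRow then p ++ [(pysty - 1, loppu + 1)] else p
    else palautus
  let palautus := if alku > 0 then palautus ++ [(pysty, alku - 1)] else palautus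
  let palautus := if loppu + 1 < lenRow then palautus ++ [(pysty, loppu + 1)] else palautus
  let palautus :=
    if pysty + 1 < (piirros.length : Int) then
      let p := if alku > 0 then palautus ++ [(pysty + 1, alku - 1)] else palautus
      let p := p ++ (PySem.List.pyRange alku (loppu + 1) 1).map (fun x => (pysty + 1, x))
      if loppu + 1 < lenRow then p ++ [(pysty + 1, loppu + 1)] else p
    else palautus
  palautus

-- ===== PORT B =====
-- Literal transliteration of Source B: the in-range rows, then the three column groups
-- (left column, middle columns over the non-span rows, right column), then sorted(pairs)
-- (Python's lexicographic tuple sort = PySem.List.sorted2 on the two components).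
def naapurit_alt (luku : List Int) (piirros : List String) : List (Int × Int) :=
  let pysty := PySem.List.pyGetD luku 1 0
  let alku  := PySem.List.pyGetD luku 2 0
  let loppu := PySem.List.pyGetD luku 3 0
  let rows : List Int :=
    (if pysty > 0 then [pysty - 1] else []) ++ [pysty] ++
      (if pysty + 1 < (piirros.length : Int) then [pysty + 1] else [])
  let pairs : List (Int × Int) := []
  let pairs := if alku > 0 then pairs ++ rows.map (fun r => (r, alku - 1)) else pairs
  let pairs := pairs ++
    (PySem.List.pyRange alku (loppu + 1) 1).flatMap
      (fun x => (rows.filter (fun r => r != pysty)).map (fun r => (r, x)))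
  let pairs :=
    if loppu + 1 < PySem.Str.len (PySem.List.pyGetD piirros pysty "") then
      pairs ++ rows.map (fun r => (r, loppu + 1))
    else pairs
  PySem.List.sorted2 pairs (fun q => q.1) (fun q => q.2) false

-- ===== PRECONDITION & SPEC =====
-- Pre_ excludes exactly the inputs where A raises IndexError: fewer than 4 fields in luku,
-- or a row index luku[1] outside [-len(piirros), len(piirros)).
def Pre_naapurit (luku : List Int) (piirros : List String) : Prop :=
  4 ≤ luku.length ∧ -(piirros.length : Int) ≤ PySem.List.pyGetD luku 1 0 ∧
    PySem.List.pyGetD luku 1 0 < (piirros.length : Int)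
instance (luku : List Int) (piirros : List String) : Decidable (Pre_naapurit luku piirros) := by
  unfold Pre_naapurit; infer_instance
def pvWitness_naapurit : List Int × List String := ([7, 1, 2, 4], ["467..114..", "...*......", "..35..633."])

-- On degenerate empty spans (loppu < alku - 2) whose left and right neighbour columns are both
-- emitted (alku > 0 and loppu + 1 < len(piirros[pysty])), A returns each row's two neighbour
-- columns in decreasing column order (left alku-1 before right loppu+1 although alku-1 > loppu+1),
-- an artefact of its append order; B returns them in increasing order, the order A itself
-- produces on every real (nonempty) span, which is the intended one.
def D_naapurit (luku : List Int) (piirros : List String) : Prop :=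
  PySem.List.pyGetD luku 3 0 < PySem.List.pyGetD luku 2 0 - 2 ∧
    0 < PySem.List.pyGetD luku 2 0 ∧
    PySem.List.pyGetD luku 3 0 + 1 <
      PySem.Str.len (PySem.List.pyGetD piirros (PySem.List.pyGetD luku 1 0) "")
instance (luku : List Int) (piirros : List String) : Decidable (D_naapurit luku piirros) := by
  unfold D_naapurit; infer_instance

def Spec_naapurit (luku : List Int) (piirros : List String) (out : List (Int × Int)) : Prop :=
  ¬ D_naapurit luku piirros → out = naapurit_alt luku piirros
instance (luku : List Int) (piirros : List String) (out : List (Int × Int)) : Decidable (Spec_naapurit luku piirros out) := by unfold Spec_naapurit; infer_instance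

def pvDiffWitness_naapurit : List Int × List String := ([0, 0, 3, 0], ["....."])
def pvDiffWitnessOut_naapurit : (List (Int × Int)) × (List (Int × Int)) :=
  ([(0, 2), (0, 1)], [(0, 1), (0, 2)])

-- ===== CLAIM (what is proved, stated in full; the proofs are below) =====
def Claim_unchanged_naapurit : Prop := ∀ (luku : List Int) (piirros : List String), Dom_naapurit luku piirros → Pre_naapurit luku piirros → Spec_naapurit luku piirros (naapurit luku piirros)
def Claim_changed_naapurit : Prop := Dom_naapurit (pvDiffWitness_naapurit.1) (pvDiffWitness_naapurit.2) ∧ Pre_naapurit (pvDiffWitness_naapurit.1) (pvDiffWitness_naapurit.2) ∧ D_naapurit (pvDiffWitness_naapurit.1) (pvDiffWitness_naapurit.2) ∧ naapurit (pvDiffWitness_naapurit.1) (pvDiffWitness_naapurit.2) = pvDiffWitnessOut_naapurit.1 ∧ naapurit_alt (pvDiffWitness_naapurit.1) (pvDiffWitness_naapurit.2) = pvDiffWitnessOut_naapurit.2 ∧ pvDiffWitnessOut_naapurit.1 ≠ pvDiffWitnessOut_naapurit.2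
def Claim_exact_naapurit : Prop := ∀ (luku : List Int) (piirros : List String), Dom_naapurit luku piirros → Pre_naapurit luku piirros → D_naapurit luku piirros → naapurit luku piirros ≠ naapurit_alt luku piirros

-- ===== LEMMAS AND PROOFS =====

-- Python's (default) order on int pairs: lexicographic.
def lexLe (u v : Int × Int) : Prop := u.1 < v.1 ∨ (u.1 = v.1 ∧ u.2 ≤ v.2)

-- the comparison Bool sorted2 uses for key (q.1, q.2), reverse=False
def bf (u v : Int × Int) : Bool :=
  decide (u.1 < v.1) || (!decide (v.1 < u.1) && decide (u.2 < v.2))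

lemma sorted2_eq_foldl (xs : List (Int × Int)) :
    PySem.List.sorted2 xs (fun q => q.1) (fun q => q.2) false =
      xs.foldl (fun acc x => PySem.List.insertBy bf x acc) [] := rfl

lemma bf_true_iff (u v : Int × Int) :
    bf u v = true ↔ (u.1 < v.1 ∨ (u.1 = v.1 ∧ u.2 < v.2)) := by
  simp [bf]; omega

lemma pairwise_insertBy (x : Int × Int) (ys : List (Int × Int))
    (h : ys.Pairwise lexLe) : (PySem.List.insertBy bf x ys).Pairwise lexLe := by
  induction ys with
  | nil => simp [PySem.List.insertBy]
  | cons y ys ih =>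
    by_cases hb : bf x y = true
    · have hxy : x.1 < y.1 ∨ (x.1 = y.1 ∧ x.2 < y.2) := (bf_true_iff x y).mp hb
      simp only [PySem.List.insertBy, hb, if_true]
      refine List.pairwise_cons.mpr ⟨?_, h⟩
      intro z hz
      rcases List.mem_cons.mp hz with rfl | hz
      · unfold lexLe; omega
      · have hyz := (List.pairwise_cons.mp h).1 z hz
        unfold lexLe at hyz ⊢; omega
    · have hnot : ¬ (x.1 < y.1 ∨ (x.1 = y.1 ∧ x.2 < y.2)) :=
        fun hc => hb ((bf_true_iff x y).mpr hc)
      simp only [PySem.List.insertBy, hb]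
      refine List.pairwise_cons.mpr ⟨?_, ih (List.pairwise_cons.mp h).2⟩
      intro z hz
      rcases (PySem.List.mem_insertBy bf x z ys).mp hz with rfl | hz
      · unfold lexLe; omega
      · exact (List.pairwise_cons.mp h).1 z hz

lemma pairwise_foldl_insertBy (xs : List (Int × Int)) :
    ∀ acc : List (Int × Int), acc.Pairwise lexLe →
      (xs.foldl (fun acc x => PySem.List.insertBy bf x acc) acc).Pairwise lexLe := by
  induction xs with
  | nil => intro acc h; simpa using h
  | cons x xs ih => intro acc h; exact ih _ (pairwise_insertBy x acc h)

lemma pairwise_sorted2 (xs : List (Int × Int)) :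
    (PySem.List.sorted2 xs (fun q => q.1) (fun q => q.2) false).Pairwise lexLe := by
  rw [sorted2_eq_foldl]; exact pairwise_foldl_insertBy xs [] (by simp)

-- the middle columns over the two outer rows, interleaved vs concatenated
lemma flatMap_two (u v : Int) (rng : List Int) :
    (rng.flatMap (fun x => [(u, x), (v, x)])).Perm
      (rng.map (fun x => (u, x)) ++ rng.map (fun x => (v, x))) := by
  induction rng with
  | nil => simp
  | cons x t ih =>
    simp only [List.flatMap_cons, List.map_cons, List.cons_append]
    refine List.Perm.cons _ ?_
    exact (ih.cons _).trans List.perm_middle.symm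

-- canonical row block of A's output
def blockOf (r a l w : Int) (mid : Bool) : List (Int × Int) :=
  (if 0 < a then [(r, a - 1)] else []) ++
    (if mid then (PySem.List.pyRange a (l + 1) 1).map (fun x => (r, x)) else []) ++
    (if l + 1 < w then [(r, l + 1)] else [])

lemma mem_blockOf_fst {q : Int × Int} {r a l w : Int} {mid : Bool}
    (h : q ∈ blockOf r a l w mid) : q.1 = r := by
  unfold blockOf at h
  simp only [List.mem_append] at h
  rcases h with (h | h) | h
  · split_ifs at h <;> simp_all
  · split_ifs at h <;> simp_all
    obtain ⟨x, _, rfl⟩ := h; rfl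
  · split_ifs at h <;> simp_all

lemma pairwise_blockOf (r a l w : Int) (mid : Bool)
    (hnd : 0 < a → l + 1 < w → a - 1 ≤ l + 1) :
    (blockOf r a l w mid).Pairwise lexLe := by
  unfold blockOf
  rw [List.pairwise_append, List.pairwise_append]
  refine ⟨⟨?_, ?_, ?_⟩, ?_, ?_⟩
  · split_ifs <;> simp
  · split_ifs with h
    · refine List.Pairwise.map _ ?_ (PySem.List.pairwise_lt_pyRange_one a (l + 1))
      intro x y hxy; exact Or.inr ⟨rfl, le_of_lt hxy⟩
    · simp
  · intro u hu v hv
    split_ifs at hu hv with h1 h2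
    · simp only [List.mem_singleton] at hu
      simp only [List.mem_map, PySem.List.mem_pyRange_one] at hv
      obtain ⟨x, hx, rfl⟩ := hv
      subst hu
      exact Or.inr ⟨rfl, by omega⟩
    · simp at hv
    · simp at hu
    · simp at hu
  · split_ifs <;> simp
  · intro u hu v hv
    split_ifs at hv with h3
    · rcases List.mem_append.mp hu with hu | hu
      · split_ifs at hu with h1
        · simp only [List.mem_singleton] at hu hv
          subst hu; subst hv
          exact Or.inr ⟨rfl, hnd h1 h3⟩
        · simp at hu
      · split_ifs at hu with h2
        · simp only [List.mem_map, PySem.List.mem_pyRange_one] at hu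
          simp only [List.mem_singleton] at hv
          obtain ⟨x, hx, rfl⟩ := hu
          subst hv
          exact Or.inr ⟨rfl, by omega⟩
        · simp at hu
    · simp at hv

-- canonical forms of the two ports' lists
def AoutC (p a l w L : Int) : List (Int × Int) :=
  (if 0 < p then blockOf (p - 1) a l w true else []) ++ blockOf p a l w false ++
    (if p + 1 < L then blockOf (p + 1) a l w true else [])

def rowsC (p L : Int) : List Int :=
  (if 0 < p then [p - 1] else []) ++ [p] ++ (if p + 1 < L then [p + 1] else [])

def pairsC (p a l w L : Int) : List (Int × Int) :=
  (if 0 < a then (rowsC p L).map (fun r => (r, a - 1)) else []) ++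
    (PySem.List.pyRange a (l + 1) 1).flatMap
      (fun x => ((rowsC p L).filter (fun r => r != p)).map (fun r => (r, x))) ++
    (if l + 1 < w then (rowsC p L).map (fun r => (r, l + 1)) else [])

lemma pairwise_AoutC (p a l w L : Int)
    (hnd : 0 < a → l + 1 < w → a - 1 ≤ l + 1) :
    (AoutC p a l w L).Pairwise lexLe := by
  have hb := fun r mid => pairwise_blockOf r a l w mid hnd
  unfold AoutC
  rw [List.pairwise_append, List.pairwise_append]
  refine ⟨⟨?_, hb p false, ?_⟩, ?_, ?_⟩
  · split_ifs
    · exact hb _ true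
    · exact List.Pairwise.nil
  · intro u hu v hv
    split_ifs at hu with h
    · have h1 := mem_blockOf_fst hu
      have h2 := mem_blockOf_fst hv
      exact Or.inl (by omega)
    · simp at hu
  · split_ifs
    · exact hb _ true
    · exact List.Pairwise.nil
  · intro u hu v hv
    split_ifs at hv with h
    · have h2 := mem_blockOf_fst hv
      rcases List.mem_append.mp hu with hu | hu
      · split_ifs at hu with h'
        · have h1 := mem_blockOf_fst hu
          exact Or.inl (by omega)
        · simp at hu
      · have h1 := mem_blockOf_fst hu
        exact Or.inl (by omega)
    · simp at hv

lemma perm_pairsC_AoutC (p a l w L : Int) :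
    (pairsC p a l w L).Perm (AoutC p a l w L) := by
  unfold pairsC AoutC rowsC blockOf
  have e1 : ((p - 1 : Int) != p) = true := by simp
  have e2 : ((p : Int) != p) = false := by simp
  have e3 : ((p + 1 : Int) != p) = true := by simp
  by_cases hp : 0 < p <;> by_cases hq : p + 1 < L <;> by_cases ha : 0 < a <;>
    by_cases hw : l + 1 < w <;>
    simp only [hp, hq, ha, hw, if_true, if_false, Bool.false_eq_true,
      List.nil_append, List.append_nil, List.cons_append, List.filter_cons, List.filter_nil,
      List.map_cons, List.map_nil, e1, e2, e3, ← List.map_eq_flatMap]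
  all_goals refine Multiset.coe_eq_coe.mp ?_
  all_goals try simp only [← Multiset.cons_coe, ← Multiset.coe_add, ← Multiset.singleton_add,
    Multiset.coe_nil]
  all_goals try rw [show (List.flatMap (fun _ => ([] : List (Int × Int)))
      (PySem.List.pyRange a (l + 1) 1)) = [] from by simp]
  all_goals try rw [Multiset.coe_eq_coe.mpr (flatMap_two (p - 1) (p + 1) _)]
  all_goals try simp only [← Multiset.cons_coe, ← Multiset.coe_add, ← Multiset.singleton_add,
    Multiset.coe_nil]
  all_goals abel

lemma lexLe_antisymm_on (l₁ l₂ : List (Int × Int)) :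
    ∀ u v : Int × Int, u ∈ l₁ → v ∈ l₂ → lexLe u v → lexLe v u → u = v := by
  intro u v _ _ h1 h2
  unfold lexLe at h1 h2
  have : u.1 = v.1 ∧ u.2 = v.2 := by omega
  exact Prod.ext this.1 this.2

lemma core (p a l w L : Int) (hnd : 0 < a → l + 1 < w → a - 1 ≤ l + 1) :
    PySem.List.sorted2 (pairsC p a l w L) (fun q => q.1) (fun q => q.2) false =
      AoutC p a l w L := by
  refine List.Perm.eq_of_pairwise (lexLe_antisymm_on _ _) (pairwise_sorted2 _)
    (pairwise_AoutC p a l w L hnd) ?_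
  exact (PySem.List.sorted2_perm _ _ _ _).trans (perm_pairsC_AoutC p a l w L)

-- the two ports compute the canonical forms
lemma naapurit_eq_AoutC (luku : List Int) (piirros : List String) :
    naapurit luku piirros =
      AoutC (PySem.List.pyGetD luku 1 0) (PySem.List.pyGetD luku 2 0)
        (PySem.List.pyGetD luku 3 0)
        (PySem.Str.len (PySem.List.pyGetD piirros (PySem.List.pyGetD luku 1 0) ""))
        (piirros.length : Int) := by
  unfold naapurit AoutC blockOf
  dsimp only []
  simp only [gt_iff_lt, Bool.false_eq_true, if_false, if_true]
  split_ifs <;> simp only [List.nil_append, List.append_nil, List.append_assoc]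

lemma naapurit_alt_eq (luku : List Int) (piirros : List String) :
    naapurit_alt luku piirros =
      PySem.List.sorted2
        (pairsC (PySem.List.pyGetD luku 1 0) (PySem.List.pyGetD luku 2 0)
          (PySem.List.pyGetD luku 3 0)
          (PySem.Str.len (PySem.List.pyGetD piirros (PySem.List.pyGetD luku 1 0) ""))
          (piirros.length : Int))
        (fun q => q.1) (fun q => q.2) false := by
  unfold naapurit_alt pairsC rowsC
  dsimp only []
  simp only [gt_iff_lt]
  split_ifs <;> simp only [List.nil_append, List.append_nil, List.append_assoc]

-- ===== VERDICT (by name: the statement is the Claim_ definition above) =====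
theorem naapurit_spec : Claim_unchanged_naapurit := by
  intro luku piirros _hDom _hPre hnd
  unfold D_naapurit at hnd
  rw [naapurit_eq_AoutC, naapurit_alt_eq]
  exact (core _ _ _ _ _ (by omega)).symm

theorem naapurit_changed : Claim_changed_naapurit := by
  unfold Claim_changed_naapurit; decide

theorem naapurit_tight : Claim_exact_naapurit := by
  intro luku piirros _hDom _hPre hD hEq
  obtain ⟨h1, h2, h3⟩ := hD
  have hA := naapurit_eq_AoutC luku piirros
  have hsorted : (naapurit_alt luku piirros).Pairwise lexLe := by
    rw [naapurit_alt_eq]; exact pairwise_sorted2 _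
  rw [hEq, naapurit_alt_eq] at hA
  have hpwA : (AoutC (PySem.List.pyGetD luku 1 0) (PySem.List.pyGetD luku 2 0)
      (PySem.List.pyGetD luku 3 0)
      (PySem.Str.len (PySem.List.pyGetD piirros (PySem.List.pyGetD luku 1 0) ""))
      (piirros.length : Int)).Pairwise lexLe := by
    rw [← hA]; exact pairwise_sorted2 _
  have hblock : blockOf (PySem.List.pyGetD luku 1 0) (PySem.List.pyGetD luku 2 0)
      (PySem.List.pyGetD luku 3 0)
      (PySem.Str.len (PySem.List.pyGetD piirros (PySem.List.pyGetD luku 1 0) "")) false =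
      [(PySem.List.pyGetD luku 1 0, PySem.List.pyGetD luku 2 0 - 1),
       (PySem.List.pyGetD luku 1 0, PySem.List.pyGetD luku 3 0 + 1)] := by
    unfold blockOf
    rw [if_pos h2, if_pos h3]
    simp
  have hsub : [(PySem.List.pyGetD luku 1 0, PySem.List.pyGetD luku 2 0 - 1),
       (PySem.List.pyGetD luku 1 0, PySem.List.pyGetD luku 3 0 + 1)].Sublist
      (AoutC (PySem.List.pyGetD luku 1 0) (PySem.List.pyGetD luku 2 0)
        (PySem.List.pyGetD luku 3 0)
        (PySem.Str.len (PySem.List.pyGetD piirros (PySem.List.pyGetD luku 1 0) ""))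
        (piirros.length : Int)) := by
    unfold AoutC
    rw [hblock]
    exact (List.sublist_append_right _ _).trans (List.sublist_append_left _ _)
  have hpw2 := hpwA.sublist hsub
  have hle := (List.pairwise_cons.mp hpw2).1
    (PySem.List.pyGetD luku 1 0, PySem.List.pyGetD luku 3 0 + 1) (by simp)
  unfold lexLe at hle
  dsimp only at hle
  omega
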